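-- pv_equiv track=rewrite | github.com/Kensufox/Rain-Guessr | map-reader/read_map - Copie.py | points_to_vector_s
-- ===== SOURCE A (Python) =====
-- def points_to_vector_s(points_list_sl, points_list_sr):
--     #loop for the left slope
--     vector_list_sl = []
--     checked = set()
--     for i in range(len(points_list_sl)):
--         if i not in checked:
--             for j in range(len(points_list_sl)):
--                 if i != j and (points_list_sl[i][0] - points_list_sl[i][1]) == (points_list_sl[j][0] - points_list_sl[j][1]):
--                     checked.add(i)
--                     checked.add(j)
--                     vector_list_sl.append([points_list_sl[i], points_list_sl[j]])
--     #loop for the right slope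
--     vector_list_sr = []
--     checked = set()
--     for i in range(len(points_list_sr)):
--         if i not in checked:
--             for j in range(len(points_list_sr)):
--                 if i != j and (points_list_sr[i][0] + points_list_sr[i][1]) == (points_list_sr[j][0] + points_list_sr[j][1]):
--                     checked.add(i)
--                     checked.add(j)
--                     vector_list_sr.append([points_list_sr[i], points_list_sr[j]])
--     return vector_list_sl, vector_list_sr
-- ===== SOURCE B (Python) =====
-- def _pairs(pts, key):
--     # No pairs possible with fewer than two points.
--     if len(pts) < 2:
--         return []
--     groups = {}
--     for p in pts:
--         groups.setdefault(key(p), []).append(p)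
--     out = []
--     for g in groups.values():
--         if len(g) > 1:
--             first = g[0]
--             for q in g[1:]:
--                 out.append([first, q])
--     return out
--
-- def points_to_vector_s(points_list_sl, points_list_sr):
--     return (_pairs(points_list_sl, lambda p: p[0] - p[1]),
--             _pairs(points_list_sr, lambda p: p[0] + p[1]))
-- ===== Notes on version B (the rewrite author's own statement) =====
-- stated objective: alternative
-- what changed: B replaces A's double index scan with a checked-index set by a single dict pass grouping points by slope key (x-y resp. x+y) and then pairing each group's first point with the rest.
import Mathlib
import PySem

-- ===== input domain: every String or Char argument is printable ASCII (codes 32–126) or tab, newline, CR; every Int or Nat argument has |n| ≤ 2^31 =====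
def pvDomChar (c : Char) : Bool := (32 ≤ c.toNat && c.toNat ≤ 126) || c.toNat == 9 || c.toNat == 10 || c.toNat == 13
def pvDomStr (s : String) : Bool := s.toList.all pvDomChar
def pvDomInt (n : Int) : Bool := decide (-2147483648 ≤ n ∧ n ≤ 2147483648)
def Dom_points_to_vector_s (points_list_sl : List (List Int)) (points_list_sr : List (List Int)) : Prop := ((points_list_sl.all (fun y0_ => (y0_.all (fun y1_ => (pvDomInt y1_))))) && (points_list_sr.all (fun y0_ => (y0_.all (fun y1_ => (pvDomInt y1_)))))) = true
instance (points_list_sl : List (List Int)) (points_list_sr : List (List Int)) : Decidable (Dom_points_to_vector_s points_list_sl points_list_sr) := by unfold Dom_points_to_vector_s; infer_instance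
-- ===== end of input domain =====

-- B replaces A's checked-index double scan by a single dict grouping pass (key -> points),
-- then pairs each group's first point with the rest; objective: alternative algorithm.

-- ===== PORT A =====
-- shared key helpers: p[0] - p[1] (left slope) and p[0] + p[1] (right slope)
def pvKeyL (p : List Int) : Int := p.getD 0 0 - p.getD 1 0
def pvKeyR (p : List Int) : Int := p.getD 0 0 + p.getD 1 0

-- one of A's two identical loops, parameterised by the slope key
def pvPairLoop (key : List Int → Int) (pts : List (List Int)) : List (List (List Int)) :=
  ((List.range pts.length).foldl
    (fun st i =>
      if st.1.contains i then st
      else (List.range pts.length).foldl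
        (fun st2 j =>
          if i ≠ j ∧ key (pts.getD i []) = key (pts.getD j []) then
            (PySem.Set.add (PySem.Set.add st2.1 i) j,
             st2.2 ++ [[pts.getD i [], pts.getD j []]])
          else st2) st)
    ((PySem.Set.empty : PySem.Set Nat), ([] : List (List (List Int))))).2

def points_to_vector_s (points_list_sl : List (List Int)) (points_list_sr : List (List Int)) : List (List (List Int)) × List (List (List Int)) :=
  (pvPairLoop pvKeyL points_list_sl, pvPairLoop pvKeyR points_list_sr)

-- ===== PORT B =====
-- group the points by slope key in one pass (dict in insertion order)
def pvGroups (key : List Int → Int) (pts : List (List Int)) : PySem.Dict Int (List (List Int)) :=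
  pts.foldl (fun d p => d.modify (key p) [] (fun g => g ++ [p])) PySem.Dict.empty

-- pair each group's first point with every later member of the group
def pvPairFast (key : List Int → Int) (pts : List (List Int)) : List (List (List Int)) :=
  if pts.length < 2 then []
  else ((pvGroups key pts).values).foldl
    (fun out g =>
      if 1 < g.length then
        g.tail.foldl (fun o q => o ++ [[g.headD [], q]]) out
      else out) []

def points_to_vector_s_alt (points_list_sl : List (List Int)) (points_list_sr : List (List Int)) : List (List (List Int)) × List (List (List Int)) :=
  (pvPairFast pvKeyL points_list_sl, pvPairFast pvKeyR points_list_sr)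

-- ===== PRECONDITION & SPEC =====
-- Pre_ excludes exactly the inputs where the Python A raises IndexError: a list of at
-- least two points containing a point with fewer than two coordinates (A indexes p[0], p[1]
-- of every point as soon as the list has length ≥ 2; B raises there too, inside key()).
def Pre_points_to_vector_s (points_list_sl : List (List Int)) (points_list_sr : List (List Int)) : Prop :=
  (2 ≤ points_list_sl.length → ∀ p ∈ points_list_sl, 2 ≤ p.length) ∧
  (2 ≤ points_list_sr.length → ∀ p ∈ points_list_sr, 2 ≤ p.length)
instance (points_list_sl : List (List Int)) (points_list_sr : List (List Int)) : Decidable (Pre_points_to_vector_s points_list_sl points_list_sr) := by unfold Pre_points_to_vector_s; infer_instance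

def pvWitness_points_to_vector_s : List (List Int) × List (List Int) :=
  ([[0, 0], [1, 1], [0, 3]], [[2, 1], [1, 2]])

def Spec_points_to_vector_s (points_list_sl : List (List Int)) (points_list_sr : List (List Int)) (out : List (List (List Int)) × List (List (List Int))) : Prop := out = points_to_vector_s_alt points_list_sl points_list_sr
instance (points_list_sl : List (List Int)) (points_list_sr : List (List Int)) (out : List (List (List Int)) × List (List (List Int))) : Decidable (Spec_points_to_vector_s points_list_sl points_list_sr out) := by unfold Spec_points_to_vector_s; infer_instance

-- ===== CLAIM (what is proved, stated in full; the proofs are below) =====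
def Claim_equal_points_to_vector_s : Prop := ∀ (points_list_sl : List (List Int)) (points_list_sr : List (List Int)), Dom_points_to_vector_s points_list_sl points_list_sr → Pre_points_to_vector_s points_list_sl points_list_sr → Spec_points_to_vector_s points_list_sl points_list_sr (points_to_vector_s points_list_sl points_list_sr)

-- ===== LEMMAS AND PROOFS =====

-- proof-only abbreviations: the i-th point and its key
def pvP (pts : List (List Int)) (i : Nat) : List Int := pts.getD i []
def pvK (key : List Int → Int) (pts : List (List Int)) (i : Nat) : Int := key (pvP pts i)
-- the indices A's inner loop pairs i with
def pvMatch (key : List Int → Int) (pts : List (List Int)) (i : Nat) : List Nat :=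
  (List.range pts.length).filter (fun j => decide (i ≠ j ∧ pvK key pts i = pvK key pts j))
-- i is the first index carrying its key
def pvFO (key : List Int → Int) (pts : List (List Int)) (i : Nat) : Prop :=
  ∀ l < i, pvK key pts l ≠ pvK key pts i
-- what A appends while processing outer index i
def pvContrib (key : List Int → Int) (pts : List (List Int)) (i : Nat) : List (List (List Int)) :=
  if decide (∀ l < i, pvK key pts l ≠ pvK key pts i) && !(pvMatch key pts i).isEmpty then
    (pvMatch key pts i).map (fun j => [pvP pts i, pvP pts j])
  else []
-- the common specification both ports are proved equal to
def pvSpec (key : List Int → Int) (pts : List (List Int)) : List (List (List Int)) :=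
  (PySem.Set.ofList (pts.map key)).flatMap (fun kk =>
    let g := pts.filter (fun p => key p == kk)
    if 1 < g.length then g.tail.map (fun q => [g.headD [], q]) else [])

lemma pv_mem_match (key : List Int → Int) (pts : List (List Int)) (i j : Nat) :
    j ∈ pvMatch key pts i ↔ j < pts.length ∧ i ≠ j ∧ pvK key pts i = pvK key pts j := by
  simp [pvMatch, List.mem_filter]

-- a generic "filter by value = filter by index" bridge
lemma pv_filter_index {α : Type} (xs : List α) (d : α) (q : α → Bool) :
    xs.filter q = ((List.range xs.length).filter (fun j => q (xs.getD j d))).map (fun j => xs.getD j d) := by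
  induction xs with
  | nil => simp
  | cons x xs ih =>
    simp only [List.length_cons, List.range_succ_eq_map, List.filter_cons, List.getD_cons_zero,
      List.filter_map, Function.comp_def, Nat.succ_eq_add_one, List.getD_cons_succ]
    by_cases hqx : q x
    · simp only [hqx, if_true, List.map_cons, List.getD_cons_zero]
      rw [ih]
      simp [Function.comp_def]
    · simp only [hqx, Bool.false_eq_true, if_false]
      rw [ih]
      simp [Function.comp_def]

-- the distinct keys, in first-insertion order, are the keys of the first-occurrence indices
lemma pv_ofList_firstOcc (K : List Int) :
    PySem.Set.ofList K =
      ((List.range K.length).filter (fun i => decide (∀ l < i, K.getD l 0 ≠ K.getD i 0))).map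
        (fun i => K.getD i 0) := by
  induction K using List.reverseRecOn with
  | nil => simp [PySem.Set.ofList]
  | append_singleton K a ih =>
    have hmem : (a ∈ K) ↔ ¬ (∀ l < K.length, K.getD l 0 ≠ (K ++ [a]).getD K.length 0) := by
      have hget : (K ++ [a]).getD K.length 0 = a := by
        rw [List.getD_append_right K [a] 0 K.length le_rfl]
        simp
      rw [hget]
      constructor
      · intro ha hall
        obtain ⟨i, hi, hKi⟩ := List.mem_iff_getElem.1 ha
        exact hall i hi (by rw [List.getD_eq_getElem K 0 hi]; exact hKi)
      · intro h
        by_contra ha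
        exact h (fun l hl heq => ha (heq ▸ (List.getD_eq_getElem K 0 hl) ▸ List.getElem_mem hl))
    have hfilter_pref :
        (List.range K.length).filter
            (fun i => decide (∀ l < i, (K ++ [a]).getD l 0 ≠ (K ++ [a]).getD i 0)) =
          (List.range K.length).filter
            (fun i => decide (∀ l < i, K.getD l 0 ≠ K.getD i 0)) := by
      apply List.filter_congr
      intro i hi
      rw [List.mem_range] at hi
      apply decide_eq_decide.2
      constructor
      · intro h l hl
        have := h l hl
        rwa [List.getD_append K [a] 0 l (by omega), List.getD_append K [a] 0 i hi] at this
      · intro h l hl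
        rw [List.getD_append K [a] 0 l (by omega), List.getD_append K [a] 0 i hi]
        exact h l hl
    have hmap_pref : ∀ (l : List Nat), (∀ i ∈ l, i < K.length) →
        l.map (fun i => (K ++ [a]).getD i 0) = l.map (fun i => K.getD i 0) := by
      intro l hl
      apply List.map_congr_left
      intro i hi
      exact List.getD_append K [a] 0 i (hl i hi)
    have hget : (K ++ [a]).getD K.length 0 = a := by
      rw [List.getD_append_right K [a] 0 K.length le_rfl]
      simp
    have hlen : (K ++ [a]).length = K.length + 1 := by simp
    rw [hlen, List.range_succ, List.filter_append, List.map_append, hfilter_pref]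
    rw [hmap_pref _ (fun i hi => List.mem_range.1 (List.mem_of_mem_filter hi))]
    rw [PySem.Set.ofList_append_singleton]
    have hsing : decide (∀ l < K.length, (K ++ [a]).getD l 0 ≠ (K ++ [a]).getD K.length 0) =
        decide (∀ l < K.length, K.getD l 0 ≠ (K ++ [a]).getD K.length 0) := by
      apply decide_eq_decide.2
      constructor
      · intro h l hl
        have := h l hl
        rwa [List.getD_append K [a] 0 l hl] at this
      · intro h l hl
        rw [List.getD_append K [a] 0 l hl]
        exact h l hl
    rw [List.filter_singleton, hsing]
    by_cases ha : a ∈ K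
    · have hP : decide (∀ l < K.length, K.getD l 0 ≠ (K ++ [a]).getD K.length 0) = false :=
        decide_eq_false (hmem.1 ha)
      rw [hP, PySem.Set.add_of_mem ((PySem.Set.mem_ofList K a).2 ha), ih]
      simp
    · have hP : decide (∀ l < K.length, K.getD l 0 ≠ (K ++ [a]).getD K.length 0) = true := by
        apply decide_eq_true
        intro l hl heq
        rw [hget] at heq
        exact ha (heq ▸ (List.getD_eq_getElem K 0 hl) ▸ List.getElem_mem hl)
      rw [hP, PySem.Set.add_of_not_mem (fun h => ha ((PySem.Set.mem_ofList K a).1 h)), ih]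
      simp


-- the indices with key k i, in order, are i followed by pvMatch i (when i is first of its key)
lemma pv_filter_key_eq (key : List Int → Int) (pts : List (List Int)) (i : Nat)
    (hi : i < pts.length) (hfo : pvFO key pts i) :
    (List.range pts.length).filter (fun j => decide (pvK key pts j = pvK key pts i)) =
      i :: pvMatch key pts i := by
  have hcnt : pts.length - i = (pts.length - i - 1) + 1 := by omega
  have hsum : i + (pts.length - i) = pts.length := by omega
  have h1 := List.range'_append (s := 0) (m := i) (n := pts.length - i) (step := 1)
  rw [Nat.zero_add, Nat.one_mul, hsum] at h1
  have hsplit : List.range pts.length =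
      List.range' 0 i ++ (i :: List.range' (i + 1) (pts.length - i - 1)) := by
    rw [List.range_eq_range', ← h1, hcnt, List.range'_succ]
    have h2 : pts.length - i - 1 + 1 - 1 = pts.length - i - 1 := by omega
    rw [h2]
  have hpre : ∀ (p : Nat → Bool), (∀ j < i, p j = false) →
      (List.range' 0 i).filter p = [] := by
    intro p hp
    apply List.filter_eq_nil_iff.2
    intro j hj
    rw [List.mem_range'_1] at hj
    simp [hp j (by omega)]
  rw [hsplit, List.filter_append, List.filter_cons]
  rw [hpre _ (fun j hj => decide_eq_false (hfo j hj))]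
  have hii : decide (pvK key pts i = pvK key pts i) = true := decide_eq_true rfl
  rw [hii]
  simp only [List.nil_append, if_true]
  congr 1
  unfold pvMatch
  rw [hsplit, List.filter_append, List.filter_cons]
  rw [hpre _ (fun j hj => decide_eq_false (fun h => hfo j hj h.2.symm))]
  have hi0 : decide (i ≠ i ∧ pvK key pts i = pvK key pts i) = false := by simp
  rw [hi0]
  simp only [List.nil_append, if_false, Bool.false_eq_true]
  apply List.filter_congr
  intro j hj
  rw [List.mem_range'_1] at hj
  apply decide_eq_decide.2
  constructor
  · intro h
    exact ⟨by omega, h.symm⟩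
  · intro h
    exact h.2.symm

-- A's per-group contribution equals the spec's contribution for i's key
lemma pv_contrib_eq (key : List Int → Int) (pts : List (List Int)) (i : Nat)
    (hi : i < pts.length) (hfo : pvFO key pts i) :
    (let g := pts.filter (fun p => key p == pvK key pts i)
     if 1 < g.length then g.tail.map (fun q => [g.headD [], q]) else []) =
      pvContrib key pts i := by
  have hg : pts.filter (fun p => key p == pvK key pts i) =
      (i :: pvMatch key pts i).map (fun j => pts.getD j []) := by
    rw [pv_filter_index pts [] (fun p => key p == pvK key pts i)]
    rw [List.filter_congr (q := fun j => decide (pvK key pts j = pvK key pts i))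
      (fun j _ => by rw [Bool.eq_iff_iff]; simp [pvK, pvP])]
    rw [pv_filter_key_eq key pts i hi hfo]
  show (if 1 < (pts.filter (fun p => key p == pvK key pts i)).length then
      (pts.filter (fun p => key p == pvK key pts i)).tail.map
        (fun q => [(pts.filter (fun p => key p == pvK key pts i)).headD [], q])
    else []) = pvContrib key pts i
  rw [hg]
  have hfo' : decide (∀ l < i, pvK key pts l ≠ pvK key pts i) = true := decide_eq_true hfo
  cases hM : pvMatch key pts i with
  | nil =>
    unfold pvContrib
    rw [hM, hfo']
    simp
  | cons a t =>
    unfold pvContrib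
    rw [hM, hfo']
    simp [List.map_map, Function.comp_def, pvP]

-- ===== A side =====

-- A's inner loop: the appended pairs
lemma pv_inner_snd (key : List Int → Int) (pts : List (List Int)) (i : Nat)
    (js : List Nat) (c : PySem.Set Nat) (out : List (List (List Int))) :
    (js.foldl
      (fun st2 j =>
        if i ≠ j ∧ key (pts.getD i []) = key (pts.getD j []) then
          (PySem.Set.add (PySem.Set.add st2.1 i) j,
           st2.2 ++ [[pts.getD i [], pts.getD j []]])
        else st2) (c, out)).2 =
      out ++ (js.filter (fun j => decide (i ≠ j ∧ key (pts.getD i []) = key (pts.getD j [])))).map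
        (fun j => [pts.getD i [], pts.getD j []]) := by
  induction js generalizing c out with
  | nil => simp
  | cons j js ih =>
    simp only [List.foldl_cons, List.filter_cons, decide_eq_true_eq]
    split_ifs with hq
    · rw [ih]; simp
    · exact ih c out

-- A's inner loop: membership in the checked set afterwards
lemma pv_inner_fst (key : List Int → Int) (pts : List (List Int)) (i : Nat)
    (js : List Nat) (c : PySem.Set Nat) (out : List (List (List Int))) (x : Nat) :
    (x ∈ (js.foldl
      (fun st2 j =>
        if i ≠ j ∧ key (pts.getD i []) = key (pts.getD j []) then
          (PySem.Set.add (PySem.Set.add st2.1 i) j,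
           st2.2 ++ [[pts.getD i [], pts.getD j []]])
        else st2) (c, out)).1) ↔
      (x ∈ c ∨ ((js.filter (fun j => decide (i ≠ j ∧ key (pts.getD i []) = key (pts.getD j [])))) ≠ [] ∧
        (x = i ∨ x ∈ js.filter (fun j => decide (i ≠ j ∧ key (pts.getD i []) = key (pts.getD j [])))))) := by
  induction js generalizing c out with
  | nil => simp
  | cons j js ih =>
    simp only [List.foldl_cons, List.filter_cons, decide_eq_true_eq]
    split_ifs with hq
    · rw [ih]
      constructor
      · rintro (h | ⟨-, h⟩)
        · rcases (PySem.Set.mem_add _ _ _).1 h with h' | h'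
          · rcases (PySem.Set.mem_add _ _ _).1 h' with h'' | h''
            · exact Or.inl h''
            · exact Or.inr ⟨List.cons_ne_nil _ _, Or.inl h''⟩
          · exact Or.inr ⟨List.cons_ne_nil _ _, Or.inr (List.mem_cons.2 (Or.inl h'))⟩
        · rcases h with h | h
          · exact Or.inr ⟨List.cons_ne_nil _ _, Or.inl h⟩
          · exact Or.inr ⟨List.cons_ne_nil _ _, Or.inr (List.mem_cons.2 (Or.inr h))⟩
      · rintro (h | ⟨-, h⟩)
        · exact Or.inl ((PySem.Set.mem_add _ _ _).2 (Or.inl ((PySem.Set.mem_add _ _ _).2 (Or.inl h))))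
        · rcases h with h | h
          · exact Or.inl ((PySem.Set.mem_add _ _ _).2 (Or.inl ((PySem.Set.mem_add _ _ _).2 (Or.inr h))))
          · rcases List.mem_cons.1 h with h' | h'
            · exact Or.inl ((PySem.Set.mem_add _ _ _).2 (Or.inr h'))
            · exact Or.inr ⟨List.ne_nil_of_mem h', Or.inr h'⟩
    · exact ih c out

-- the invariant describing the checked set after processing outer indices < m
def pvInC (key : List Int → Int) (pts : List (List Int)) (m x : Nat) : Prop :=
  x < pts.length ∧ pvMatch key pts x ≠ [] ∧ ∃ l < m, pvK key pts l = pvK key pts x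

-- the filter A's inner loop performs is pvMatch
lemma pv_match_eq (key : List Int → Int) (pts : List (List Int)) (i : Nat) :
    (List.range pts.length).filter
        (fun j => decide (i ≠ j ∧ key (pts.getD i []) = key (pts.getD j []))) =
      pvMatch key pts i := rfl

-- A's outer loop, processed from index m on
lemma pv_outer (key : List Int → Int) (pts : List (List Int)) :
    ∀ (cnt m : Nat), m + cnt = pts.length →
    ∀ (c : PySem.Set Nat) (out : List (List (List Int))),
    (∀ x, x ∈ c ↔ pvInC key pts m x) →
    ((List.range' m cnt).foldl
      (fun st i =>
        if st.1.contains i then st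
        else (List.range pts.length).foldl
          (fun st2 j =>
            if i ≠ j ∧ key (pts.getD i []) = key (pts.getD j []) then
              (PySem.Set.add (PySem.Set.add st2.1 i) j,
               st2.2 ++ [[pts.getD i [], pts.getD j []]])
            else st2) st) (c, out)).2 =
      out ++ (List.range' m cnt).flatMap (pvContrib key pts) := by
  intro cnt
  induction cnt with
  | zero => intro m hm c out hc; simp
  | succ cnt ih =>
    intro m hm c out hc
    have hmn : m < pts.length := by omega
    rw [List.range'_succ, List.foldl_cons, List.flatMap_cons]
    by_cases hcm : m ∈ c
    · -- m already checked: skipped, contributes nothing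
      rw [if_pos ((PySem.Set.contains_iff c m).2 hcm)]
      obtain ⟨-, hmatch, l, hl, hkl⟩ := (hc m).1 hcm
      have hfo : ¬ (∀ l' < m, pvK key pts l' ≠ pvK key pts m) :=
        fun hall => hall l hl hkl
      have hcontrib : pvContrib key pts m = [] := by
        have hd : decide (∀ l' < m, pvK key pts l' ≠ pvK key pts m) = false := decide_eq_false hfo
        unfold pvContrib
        rw [hd]
        simp
      have hc' : ∀ x, x ∈ c ↔ pvInC key pts (m + 1) x := by
        intro x
        rw [hc x]
        constructor
        · rintro ⟨hx, hmx, l', hl', hk'⟩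
          exact ⟨hx, hmx, l', by omega, hk'⟩
        · rintro ⟨hx, hmx, l', hl', hk'⟩
          by_cases hlm : l' < m
          · exact ⟨hx, hmx, l', hlm, hk'⟩
          · have hlm0 : l' = m := by omega
            rw [hlm0] at hk'
            exact ⟨hx, hmx, l, hl, hkl.trans hk'⟩
      rw [ih (m + 1) (by omega) c out hc', hcontrib]
      simp
    · -- m unchecked: the inner loop runs
      rw [if_neg (by simpa [PySem.Set.contains_iff] using hcm)]
      have hninc : ¬ pvInC key pts m m := fun h => hcm ((hc m).2 h)
      -- the state after the inner loop
      set st' := (List.range pts.length).foldl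
          (fun st2 j =>
            if m ≠ j ∧ key (pts.getD m []) = key (pts.getD j []) then
              (PySem.Set.add (PySem.Set.add st2.1 m) j,
               st2.2 ++ [[pts.getD m [], pts.getD j []]])
            else st2) (c, out) with hst'
      have hsnd : st'.2 = out ++ (pvMatch key pts m).map (fun j => [pts.getD m [], pts.getD j []]) := by
        rw [hst', pv_inner_snd, pv_match_eq]
      have hfst : ∀ x, x ∈ st'.1 ↔
          (x ∈ c ∨ (pvMatch key pts m ≠ [] ∧ (x = m ∨ x ∈ pvMatch key pts m))) := by
        intro x
        rw [hst', pv_inner_fst, pv_match_eq]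
      by_cases hF : pvMatch key pts m = []
      · -- no mate: nothing appended, nothing checked
        have hcontrib : pvContrib key pts m = [] := by
          simp [pvContrib, hF]
        have hnomate : ∀ j < pts.length, j ≠ m → pvK key pts j ≠ pvK key pts m := by
          intro j hj hjm hkj
          have : j ∈ pvMatch key pts m := (pv_mem_match key pts m j).2 ⟨hj, Ne.symm hjm, hkj.symm⟩
          simp [hF] at this
        have hc' : ∀ x, x ∈ st'.1 ↔ pvInC key pts (m + 1) x := by
          intro x
          rw [hfst x]
          simp only [hF, ne_eq, not_true_eq_false, false_and, or_false]
          rw [hc x]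
          constructor
          · rintro ⟨hx, hmx, l', hl', hk'⟩
            exact ⟨hx, hmx, l', by omega, hk'⟩
          · rintro ⟨hx, hmx, l', hl', hk'⟩
            by_cases hlm : l' < m
            · exact ⟨hx, hmx, l', hlm, hk'⟩
            · have hlm0 : l' = m := by omega
              rw [hlm0] at hk'
              by_cases hxm : x = m
              · rw [hxm] at hmx; exact absurd hF hmx
              · exact absurd hk'.symm (hnomate x hx hxm)
        have := ih (m + 1) (by omega) st'.1 st'.2 hc'
        rw [Prod.mk.eta] at this
        rw [this, hsnd, hcontrib, hF]
        simp
      · -- m is the first index of a key shared with a mate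
        have hfo : ∀ l' < m, pvK key pts l' ≠ pvK key pts m := by
          intro l' hl' hk'
          exact hninc ⟨hmn, hF, l', hl', hk'⟩
        have hcontrib : pvContrib key pts m =
            (pvMatch key pts m).map (fun j => [pvP pts m, pvP pts j]) := by
          have hd : decide (∀ l' < m, pvK key pts l' ≠ pvK key pts m) = true := decide_eq_true hfo
          have he : (pvMatch key pts m).isEmpty = false := by
            cases hPM : pvMatch key pts m with
            | nil => exact absurd hPM hF
            | cons a t => rfl
          unfold pvContrib
          rw [hd, he]
          simp
        have hc' : ∀ x, x ∈ st'.1 ↔ pvInC key pts (m + 1) x := by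
          intro x
          rw [hfst x]
          constructor
          · rintro (hx | ⟨-, hx | hx⟩)
            · obtain ⟨h1, h2, l', hl', hk'⟩ := (hc x).1 hx
              exact ⟨h1, h2, l', by omega, hk'⟩
            · rw [hx]; exact ⟨hmn, hF, m, by omega, rfl⟩
            · obtain ⟨hxn, hmx, hkx⟩ := (pv_mem_match key pts m x).1 hx
              have : m ∈ pvMatch key pts x :=
                (pv_mem_match key pts x m).2 ⟨hmn, Ne.symm hmx, hkx.symm⟩
              exact ⟨hxn, List.ne_nil_of_mem this, m, by omega, hkx⟩
          · rintro ⟨hx, hmx, l', hl', hk'⟩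
            by_cases hlm : l' < m
            · exact Or.inl ((hc x).2 ⟨hx, hmx, l', hlm, hk'⟩)
            · have hlm0 : l' = m := by omega
              rw [hlm0] at hk'
              by_cases hxm : x = m
              · exact Or.inr ⟨hF, Or.inl hxm⟩
              · exact Or.inr ⟨hF, Or.inr ((pv_mem_match key pts m x).2 ⟨hx, fun h => hxm h.symm, hk'⟩)⟩
        have := ih (m + 1) (by omega) st'.1 st'.2 hc'
        rw [Prod.mk.eta] at this
        rw [this, hsnd, hcontrib]
        simp [pvP]

-- a flatMap may skip elements whose image is empty
lemma pv_flatMap_filter {α β : Type} (l : List α) (p : α → Bool) (f : α → List β)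
    (h : ∀ a ∈ l, p a = false → f a = []) :
    l.flatMap f = (l.filter p).flatMap f := by
  induction l with
  | nil => simp
  | cons a l ih =>
    rw [List.flatMap_cons, List.filter_cons]
    cases hpa : p a with
    | true =>
      rw [if_pos rfl, List.flatMap_cons, ih (fun a ha => h a (List.mem_cons_of_mem _ ha))]
    | false =>
      rw [h a List.mem_cons_self hpa]
      simp only [Bool.false_eq_true, if_false, List.nil_append]
      exact ih (fun a ha => h a (List.mem_cons_of_mem _ ha))

lemma pv_flatMap_congr {α β : Type} {l : List α} {f g : α → List β}
    (h : ∀ a ∈ l, f a = g a) : l.flatMap f = l.flatMap g := by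
  induction l with
  | nil => simp
  | cons a l ih =>
    rw [List.flatMap_cons, List.flatMap_cons, h a List.mem_cons_self,
      ih (fun a ha => h a (List.mem_cons_of_mem _ ha))]

lemma pv_A_eq_contribs (key : List Int → Int) (pts : List (List Int)) :
    pvPairLoop key pts = (List.range pts.length).flatMap (pvContrib key pts) := by
  have h0 : ∀ x : Nat, x ∈ (PySem.Set.empty : PySem.Set Nat) ↔ pvInC key pts 0 x := by
    intro x
    constructor
    · intro hx
      exact absurd hx (by simp [PySem.Set.empty])
    · rintro ⟨-, -, l, hl, -⟩
      omega
  have h := pv_outer key pts pts.length 0 (by omega) PySem.Set.empty [] h0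
  unfold pvPairLoop
  rw [List.range_eq_range']
  simpa [List.range_eq_range'] using h

lemma pv_A_eq_spec (key : List Int → Int) (pts : List (List Int)) :
    pvPairLoop key pts = pvSpec key pts := by
  rw [pv_A_eq_contribs]
  unfold pvSpec
  rw [pv_ofList_firstOcc (pts.map key), List.flatMap_map]
  simp only [List.length_map]
  have hKd : ∀ i, i < pts.length → (pts.map key).getD i 0 = pvK key pts i := by
    intro i hi
    rw [List.getD_eq_getElem _ _ (by simpa using hi), List.getElem_map]
    rw [pvK, pvP, List.getD_eq_getElem _ _ hi]
  have hfilt : (List.range pts.length).filter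
      (fun i => decide (∀ l < i, (pts.map key).getD l 0 ≠ (pts.map key).getD i 0)) =
      (List.range pts.length).filter
      (fun i => decide (∀ l < i, pvK key pts l ≠ pvK key pts i)) := by
    apply List.filter_congr
    intro i hi
    rw [List.mem_range] at hi
    apply decide_eq_decide.2
    constructor
    · intro h l hl
      have := h l hl
      rwa [hKd l (by omega), hKd i hi] at this
    · intro h l hl
      rw [hKd l (by omega), hKd i hi]
      exact h l hl
  rw [hfilt]
  rw [pv_flatMap_filter (List.range pts.length)
      (fun i => decide (∀ l < i, pvK key pts l ≠ pvK key pts i)) (pvContrib key pts)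
      (fun a _ ha => by
        have ha' : decide (∀ l < a, pvK key pts l ≠ pvK key pts a) = false := ha
        unfold pvContrib
        rw [ha']
        simp)]
  apply pv_flatMap_congr
  intro i hi
  rw [List.mem_filter, List.mem_range] at hi
  obtain ⟨hin, hfo⟩ := hi
  rw [hKd i hin]
  have hfo2 : decide (∀ l < i, pvK key pts l ≠ pvK key pts i) = true := hfo
  have hfo3 : ∀ l < i, pvK key pts l ≠ pvK key pts i := of_decide_eq_true hfo2
  exact (pv_contrib_eq key pts i hin hfo3).symm

-- ===== B side =====

lemma pv_groups_fold (key : List Int → Int) (pts : List (List Int)) :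
    pvGroups key pts =
      (pts.map (fun p => (key p, p))).foldl
        (fun d q => d.modify q.1 [] (fun g => g ++ [q.2])) PySem.Dict.empty := by
  unfold pvGroups
  rw [List.foldl_map]

lemma pv_groups_getD (key : List Int → Int) (pts : List (List Int)) (kk : Int) :
    (pvGroups key pts).getD kk [] = pts.filter (fun p => key p == kk) := by
  rw [pv_groups_fold, PySem.Dict.getD_foldl_modify_append]
  simp [List.filter_map, Function.comp_def, List.map_map]

lemma pv_groups_keys (key : List Int → Int) (pts : List (List Int)) :
    (pvGroups key pts).keys = PySem.Set.ofList (pts.map key) := by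
  unfold pvGroups
  rw [PySem.Dict.keys_foldl_modify_key pts key ([] : List (List Int))
        (fun _ p => fun g => g ++ [p]) PySem.Dict.empty]
  simp [PySem.Set.update_nil_left, PySem.Dict.keys_empty]

lemma pv_groups_nodup_keys (key : List Int → Int) (pts : List (List Int)) :
    (pvGroups key pts).keys.Nodup := by
  unfold pvGroups
  exact PySem.Dict.nodup_keys_foldl_modify_key pts key ([] : List (List Int))
    (fun _ p => fun g => g ++ [p]) PySem.Dict.empty (by simp [PySem.Dict.keys_empty])

lemma pv_spec_short (key : List Int → Int) (pts : List (List Int)) (h : pts.length < 2) :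
    pvSpec key pts = [] := by
  match pts, h with
  | [], _ => simp [pvSpec]
  | [p], _ =>
      simp [pvSpec, PySem.Set.ofList, PySem.Set.add, PySem.Set.empty, List.flatMap]

lemma pv_B_eq_spec (key : List Int → Int) (pts : List (List Int)) :
    pvPairFast key pts = pvSpec key pts := by
  unfold pvPairFast
  by_cases h : pts.length < 2
  · rw [if_pos h, pv_spec_short key pts h]
  · rw [if_neg h]
    have hvals : (pvGroups key pts).values =
        (PySem.Set.ofList (pts.map key)).map (fun kk => pts.filter (fun p => key p == kk)) := by
      have := PySem.Dict.items_eq_map_keys (pvGroups key pts) (pv_groups_nodup_keys key pts) ([] : List (List Int))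
      have hv : (pvGroups key pts).values = (pvGroups key pts).items.map (fun p => p.2) := rfl
      rw [hv, this, pv_groups_keys]
      simp [List.map_map, Function.comp_def, pv_groups_getD]
    rw [hvals]
    have hstep : ∀ (out : List (List (List Int))) (g : List (List Int)),
        (if 1 < g.length then g.tail.foldl (fun o q => o ++ [[g.headD [], q]]) out else out)
          = out ++ (if 1 < g.length then g.tail.map (fun q => [g.headD [], q]) else []) := by
      intro out g
      split_ifs with hg
      · rw [PySem.List.foldl_append_singleton_eq_map]
      · simp
    have hcongr := PySem.List.foldl_congr_mem
      (l := (PySem.Set.ofList (pts.map key)).map (fun kk => pts.filter (fun p => key p == kk)))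
      (init := ([] : List (List (List Int))))
      (f := fun out g => if 1 < g.length then g.tail.foldl (fun o q => o ++ [[g.headD [], q]]) out else out)
      (g := fun out g => out ++ (if 1 < g.length then g.tail.map (fun q => [g.headD [], q]) else []))
      (by intro acc x _; exact hstep acc x)
    rw [hcongr, PySem.List.foldl_append_eq_flatMap]
    simp [pvSpec, List.flatMap_map]

-- ===== VERDICT (by name: the statement is the Claim_ definition above) =====
theorem points_to_vector_s_spec : Claim_equal_points_to_vector_s := by
  intro sl sr _ _
  unfold Spec_points_to_vector_s points_to_vector_s points_to_vector_s_alt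
  rw [pv_A_eq_spec, pv_A_eq_spec, pv_B_eq_spec, pv_B_eq_spec]
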